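-- pv_equiv track=rewrite | github.com/guilhermebaos/Advent-of-Code-Solutions | 2021/Day08/Day08-Prob1-Decode-easy-digits.py | count_easy_digits
-- ===== SOURCE A (Python) =====
-- def parse_display(display: str):
--     info, readout = display.split(' | ')
--     return [info.split(), readout.split()]
--
-- def count_easy_digits(displays: list):
--     # Parse the displays
--     displays = list(map(parse_display, displays))
--
--     # Get all individual readouts
--     readouts_list = [x[1] for x in displays]
--     readouts = []
--     for item in readouts_list:
--         readouts += [x for x in item]
--
--     # Count how many times appear unique-len strings
--     readouts_len = list(map(len, readouts))
--     return readouts_len.count(2) + readouts_len.count(3) + readouts_len.count(4) + readouts_len.count(7)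
-- ===== SOURCE B (Python) =====
-- def count_easy_digits(displays: list):
--     # Character-level state machine: scan the readout once, tracking the length
--     # of the current run of non-space characters; a run boundary closes a token,
--     # and tokens of length 2, 3, 4 or 7 are the easy digits.
--     total = 0
--     for display in displays:
--         info, readout = display.split(' | ')
--         run = 0
--         for ch in readout:
--             if ch.isspace():
--                 if run in (2, 3, 4, 7):
--                     total += 1
--                 run = 0
--             else:
--                 run += 1
--         if run in (2, 3, 4, 7):
--             total += 1
--     return total
-- ===== Notes on version B (the rewrite author's own statement) =====
-- stated objective: alternative
-- what changed: Replaces A's tokenize-flatten-map-count pipeline (parse every display, flatten all readout tokens, map to lengths, four .count() scans) by a character-level run-length state machine that scans each readout string once and never builds a token list, a length list or any intermediate structure.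
import Mathlib
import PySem

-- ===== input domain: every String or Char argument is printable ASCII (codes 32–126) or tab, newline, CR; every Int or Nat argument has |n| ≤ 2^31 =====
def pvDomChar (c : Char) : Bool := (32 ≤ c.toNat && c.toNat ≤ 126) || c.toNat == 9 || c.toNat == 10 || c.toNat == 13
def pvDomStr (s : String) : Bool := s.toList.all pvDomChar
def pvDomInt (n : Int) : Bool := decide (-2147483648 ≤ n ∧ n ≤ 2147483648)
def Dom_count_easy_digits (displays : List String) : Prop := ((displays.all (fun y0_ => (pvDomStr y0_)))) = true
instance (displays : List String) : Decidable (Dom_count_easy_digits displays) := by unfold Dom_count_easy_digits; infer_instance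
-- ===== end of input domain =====

-- B replaces A's tokenize/flatten/map/count pipeline by a character-level run-length
-- state machine over each readout string (objective: alternative; same asymptotic cost).


-- ===== PORT A =====
-- parse_display: 'info, readout = display.split(' | ')' — under Pre_, the split has
-- exactly two pieces, so the getD defaults are never the value taken.
def parse_display (display : String) : List String × List String :=
  let parts := (PySem.Str.split? display " | ").getD []
  let info := parts.getD 0 ""
  let readout := parts.getD 1 ""
  (PySem.Str.split₀ info, PySem.Str.split₀ readout)

def count_easy_digits (displays : List String) : Int :=
  let parsed := displays.map parse_display
  let readouts_list := parsed.map (fun x => x.2)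
  let readouts := readouts_list.foldl (fun acc item => acc ++ item.map (fun x => x)) []
  let readouts_len := readouts.map PySem.Str.len
  (readouts_len.count 2 : Int) + (readouts_len.count 3 : Int)
    + (readouts_len.count 4 : Int) + (readouts_len.count 7 : Int)

-- ===== PORT B =====
-- run-length state machine: state (total, run); a space closes the current run
def count_easy_digits_alt (displays : List String) : Int :=
  displays.foldl (fun total display =>
    let parts := (PySem.Str.split? display " | ").getD []
    let readout := parts.getD 1 ""
    let st := readout.toList.foldl
      (fun (st : Int × Int) ch =>
        if PySem.Chars.isspace ch then
          (if [2, 3, 4, 7].contains st.2 then st.1 + 1 else st.1, 0)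
        else (st.1, st.2 + 1)) (total, 0)
    if [2, 3, 4, 7].contains st.2 then st.1 + 1 else st.1) 0

-- ===== PRECONDITION & SPEC =====
-- Pre_ excludes exactly the inputs where a display does not split into two pieces at
-- ' | ': there Python A's tuple unpacking raises ValueError (and B's does too).
def Pre_count_easy_digits (displays : List String) : Prop :=
  ∀ s ∈ displays, ((PySem.Str.split? s " | ").getD []).length = 2
instance (displays : List String) : Decidable (Pre_count_easy_digits displays) := by
  unfold Pre_count_easy_digits; infer_instance

def pvWitness_count_easy_digits : List String :=
  ["acedgfb cdfbe gcdfa | cdfeb fcadb cdfeb cdbaf", "ab | ab cde"]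

def Spec_count_easy_digits (displays : List String) (out : Int) : Prop := out = count_easy_digits_alt displays
instance (displays : List String) (out : Int) : Decidable (Spec_count_easy_digits displays out) := by unfold Spec_count_easy_digits; infer_instance

-- ===== CLAIM (what is proved, stated in full; the proofs are below) =====
def Claim_equal_count_easy_digits : Prop := ∀ (displays : List String), Dom_count_easy_digits displays → Pre_count_easy_digits displays → Spec_count_easy_digits displays (count_easy_digits displays)

-- ===== LEMMAS AND PROOFS =====

-- the readout tokens of one display, as A's port computes them
def pvTokens (display : String) : List String :=
  PySem.Str.split₀ (((PySem.Str.split? display " | ").getD []).getD 1 "")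

def pvEasyN (n : Int) : Bool := [2, 3, 4, 7].contains n
def pvEasy (t : String) : Bool := pvEasyN (PySem.Str.len t)

-- pure reference tokenizer mirroring PySem.Chars.split₀.go without the accumulator
def pvTok : List Char → List Char → List (List Char)
  | [], cur => if cur.isEmpty then [] else [cur.reverse]
  | c :: rest, cur =>
    if PySem.Chars.isspace c then
      if cur.isEmpty then pvTok rest [] else cur.reverse :: pvTok rest []
    else pvTok rest (c :: cur)

-- A's four counts over a length list are one countP
lemma counts_nat (ls : List Int) :
    (ls.count 2 : Int) + (ls.count 3 : Int) + (ls.count 4 : Int) + (ls.count 7 : Int)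
      = (ls.countP pvEasyN : Int) := by
  induction ls with
  | nil => simp
  | cons n ls ih =>
    simp only [List.count_cons, List.countP_cons]
    by_cases h2 : n = 2 <;> by_cases h3 : n = 3 <;> by_cases h4 : n = 4 <;> by_cases h7 : n = 7 <;>
      simp [pvEasyN, h2, h3, h4, h7] <;> omega

-- …and counting over the length list is counting the easy tokens themselves
lemma counts_eq_countP (ts : List String) :
    ((ts.map PySem.Str.len).count 2 : Int) + ((ts.map PySem.Str.len).count 3 : Int)
      + ((ts.map PySem.Str.len).count 4 : Int) + ((ts.map PySem.Str.len).count 7 : Int)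
      = (ts.countP pvEasy : Int) := by
  rw [counts_nat, List.countP_map]
  rfl

-- split₀.go is the reference tokenizer with its accumulator prepended
lemma go_eq_tok (s : List Char) (cur : List Char) (acc : List (List Char)) :
    PySem.Chars.split₀.go s cur acc = acc.reverse ++ pvTok s cur := by
  induction s generalizing cur acc with
  | nil =>
    by_cases h : cur.isEmpty <;> simp [PySem.Chars.split₀.go, pvTok, h]
  | cons c rest ih =>
    by_cases hs : PySem.Chars.isspace c
    · by_cases h : cur.isEmpty <;>
        simp [PySem.Chars.split₀.go, pvTok, hs, h, ih]
    · simp [PySem.Chars.split₀.go, pvTok, hs, ih]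

-- B's loop body and its end-of-string flush, named for the proofs
def pvStep (st : Int × Int) (ch : Char) : Int × Int :=
  if PySem.Chars.isspace ch then
    (if pvEasyN st.2 then st.1 + 1 else st.1, 0)
  else (st.1, st.2 + 1)

def pvFlush (st : Int × Int) : Int :=
  if pvEasyN st.2 then st.1 + 1 else st.1

def pvCountTok (s : List Char) (cur : List Char) : Int :=
  ((pvTok s cur).countP (fun l => pvEasyN (l.length : Int)) : Int)

-- B's character scan counts exactly the easy tokens of the reference tokenizer
lemma scan_eq_tok (s : List Char) (c : Int) (cur : List Char) :
    pvFlush (s.foldl pvStep (c, (cur.length : Int))) = c + pvCountTok s cur := by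
  induction s generalizing c cur with
  | nil =>
    rcases cur with _ | ⟨a, cur⟩
    · simp [pvFlush, pvCountTok, pvTok, pvEasyN]
    · rw [List.foldl_nil]
      simp only [pvFlush, pvCountTok, pvTok, List.isEmpty_cons, List.countP_cons,
        List.countP_nil, List.length_reverse, Bool.false_eq_true, if_false]
      push_cast
      split_ifs <;> ring
  | cons ch rest ih =>
    by_cases hs : PySem.Chars.isspace ch
    · rcases cur with _ | ⟨a, cur⟩
      · simp only [List.length_nil, Nat.cast_zero, List.foldl_cons]
        rw [show pvStep (c, 0) ch = (c, 0) from by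
          simp [pvStep, hs, show pvEasyN 0 = false from by decide]]
        have h := ih c ([] : List Char)
        simp only [List.length_nil, Nat.cast_zero] at h
        rw [h]
        simp [pvCountTok, pvTok, hs]
      · simp only [List.foldl_cons]
        rw [show pvStep (c, (((a :: cur).length : Nat) : Int)) ch
            = (if pvEasyN (((a :: cur).length : Nat) : Int) then c + 1 else c, 0) from by
          simp [pvStep, hs]]
        have hct : pvCountTok (ch :: rest) (a :: cur)
            = pvCountTok rest []
              + (if pvEasyN (((a :: cur).length : Nat) : Int) then 1 else 0) := by
          unfold pvCountTok
          simp only [pvTok, hs, if_true, List.isEmpty_cons, Bool.false_eq_true,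
            if_false, List.countP_cons, List.length_reverse]
          push_cast
          ring
        have hc' : (if pvEasyN (((a :: cur).length : Nat) : Int) then c + 1 else c)
            = c + (if pvEasyN (((a :: cur).length : Nat) : Int) then 1 else 0) := by
          split_ifs <;> ring
        have h := ih (c + (if pvEasyN (((a :: cur).length : Nat) : Int) then 1 else 0))
          ([] : List Char)
        simp only [List.length_nil, Nat.cast_zero] at h
        rw [hc', h, hct]
        ring
    · simp only [List.foldl_cons]
      rw [show pvStep (c, ((cur.length : Nat) : Int)) ch
          = (c, (((ch :: cur).length : Nat) : Int)) from by
        simp [pvStep, hs, List.length_cons]]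
      rw [ih c (ch :: cur)]
      unfold pvCountTok
      simp [pvTok, hs]

-- countP over A's string tokens equals countP over the char-list tokens
lemma countP_tokens (r : String) :
    ((PySem.Str.split₀ r).countP pvEasy : Int) = pvCountTok r.toList [] := by
  unfold PySem.Str.split₀ PySem.Chars.split₀ pvCountTok
  rw [go_eq_tok]
  simp only [List.reverse_nil, List.nil_append, List.countP_map]
  norm_cast
  apply List.countP_congr
  intro l _
  simp [pvEasy, Function.comp, PySem.Str.len]

-- B's outer fold accumulates the per-display easy-token counts
lemma foldl_scan (l : List String) (c : Int) :
    l.foldl (fun total display =>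
      pvFlush ((((PySem.Str.split? display " | ").getD []).getD 1 "").toList.foldl
        pvStep (total, 0))) c
      = c + (((l.map pvTokens).flatten).countP pvEasy : Int) := by
  induction l generalizing c with
  | nil => simp
  | cons d l ih =>
    simp only [List.foldl_cons, List.map_cons, List.flatten_cons, List.countP_append]
    have hscan := scan_eq_tok (((PySem.Str.split? d " | ").getD []).getD 1 "").toList c []
    simp only [List.length_nil, Nat.cast_zero] at hscan
    rw [hscan, ih, ← countP_tokens]
    unfold pvTokens
    push_cast
    ring

theorem count_easy_digits_eq (displays : List String) :
    count_easy_digits displays = count_easy_digits_alt displays := by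
  unfold count_easy_digits
  simp only [List.map_map, List.map_id']
  rw [PySem.List.foldl_append_eq_flatMap (fun (item : List String) => item)]
  rw [counts_eq_countP]
  have hmap : displays.map ((fun x => x.2) ∘ parse_display) = displays.map pvTokens := by
    simp [parse_display, pvTokens, Function.comp]
  rw [List.nil_append, hmap]
  show ((List.flatMap (fun item => item) (displays.map pvTokens)).countP pvEasy : Int)
    = displays.foldl (fun total display =>
        pvFlush ((((PySem.Str.split? display " | ").getD []).getD 1 "").toList.foldl
          pvStep (total, 0))) 0
  rw [foldl_scan, zero_add, List.flatMap_def, List.map_id']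

-- ===== VERDICT (by name: the statement is the Claim_ definition above) =====
theorem count_easy_digits_spec : Claim_equal_count_easy_digits := by
  intro displays _ _
  exact count_easy_digits_eq displays
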